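-- pv_equiv track=rewrite | github.com/yxtay/code-ex | src/minion_game.py | minion_game
-- ===== SOURCE A (Python) =====
-- def minion_game(string):
--     # your code goes here
--     stuart = 0
--     kevin = 0
--     vowels = set("AEIOU")
--     for i, ch in enumerate(string):
--         if ch in vowels:
--             kevin += len(string) - i
--         else:
--             stuart += len(string) - i
--
--     if kevin > stuart:
--         return "KEVIN", kevin
--     elif stuart > kevin:
--         return "STUART", stuart
--     else:
--         return "DRAW", stuart
-- ===== SOURCE B (Python) =====
-- def minion_game(string):
--     # Prefix-count formulation: each position contributes the number of
--     # vowel (resp. consonant) substring-starts seen so far, since a vowel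
--     # at index i is counted once in every prefix of length > i, i.e.
--     # len(string) - i times in total. No indices or len() needed.
--     vowels = "AEIOU"
--     vc = cc = kevin = stuart = 0
--     for ch in string:
--         if ch in vowels:
--             vc += 1
--         else:
--             cc += 1
--         kevin += vc
--         stuart += cc
--     if kevin > stuart:
--         return "KEVIN", kevin
--     elif stuart > kevin:
--         return "STUART", stuart
--     else:
--         return "DRAW", stuart
-- ===== Notes on version B (the rewrite author's own statement) =====
-- stated objective: alternative
-- what changed: Replaces A's per-index weighting (adding len(string)-i at each character, needing enumerate and len) by a prefix-count sweep that maintains running vowel/consonant counts and adds the current count at every position, using the identity sum_i [vowel at i]*(n-i) = sum over prefixes of the vowel count.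
import Mathlib
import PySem

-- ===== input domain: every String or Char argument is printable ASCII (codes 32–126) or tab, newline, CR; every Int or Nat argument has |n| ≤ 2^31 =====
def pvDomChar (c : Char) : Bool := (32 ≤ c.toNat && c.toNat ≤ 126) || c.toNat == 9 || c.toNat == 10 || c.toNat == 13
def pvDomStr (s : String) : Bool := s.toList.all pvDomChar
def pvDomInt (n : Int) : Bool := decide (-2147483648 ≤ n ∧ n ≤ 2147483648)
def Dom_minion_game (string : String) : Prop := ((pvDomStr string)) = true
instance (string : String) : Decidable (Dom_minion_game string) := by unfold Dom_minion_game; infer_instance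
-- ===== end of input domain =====

-- B replaces A's per-index weighting (len(string)-i added at each vowel/consonant) by a
-- prefix-count sweep with running vowel/consonant counts added at every position; same O(n) cost.

-- ===== PORT A =====
def minion_game (string : String) : String × Int :=
  let vowels : PySem.Set Char := PySem.Set.ofList "AEIOU".toList
  let p : Int × Int :=
    (PySem.List.enumerate string.toList 0).foldl
      (fun (acc : Int × Int) x =>
        if PySem.Set.contains vowels x.2 then (acc.1, acc.2 + (PySem.Str.len string - x.1))
        else (acc.1 + (PySem.Str.len string - x.1), acc.2))
      (0, 0)
  if p.2 > p.1 then ("KEVIN", p.2)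
  else if p.1 > p.2 then ("STUART", p.1)
  else ("DRAW", p.1)

-- ===== PORT B =====
-- 'ch in vowels' on the one-character ch is membership of ch among "AEIOU"'s characters (exact).
def minion_game_alt (string : String) : String × Int :=
  let q : Int × Int × Int × Int :=
    string.toList.foldl
      (fun (a : Int × Int × Int × Int) ch =>
        let vc := if "AEIOU".toList.contains ch then a.1 + 1 else a.1
        let cc := if "AEIOU".toList.contains ch then a.2.1 else a.2.1 + 1
        (vc, cc, a.2.2.1 + vc, a.2.2.2 + cc))
      (0, 0, 0, 0)
  let kevin := q.2.2.1
  let stuart := q.2.2.2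
  if kevin > stuart then ("KEVIN", kevin)
  else if stuart > kevin then ("STUART", stuart)
  else ("DRAW", stuart)

-- ===== PRECONDITION & SPEC =====
def Spec_minion_game (string : String) (out : String × Int) : Prop := out = minion_game_alt string
instance (string : String) (out : String × Int) : Decidable (Spec_minion_game string out) := by unfold Spec_minion_game; infer_instance

-- ===== CLAIM (what is proved, stated in full; the proofs are below) =====
def Claim_equal_minion_game : Prop := ∀ (string : String), Dom_minion_game string → Spec_minion_game string (minion_game string)

-- ===== LEMMAS AND PROOFS =====

-- total weight of the positions of l satisfying p, each weighted by its suffix length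
def pvWsum (p : Char → Bool) : List Char → Int
  | [] => 0
  | c :: t => (if p c then ((t.length : Int) + 1) else 0) + pvWsum p t

-- A's loop: starting weights n - i over enumerate l s with n = s + |l| are exactly suffix lengths.
theorem pv_loopA (n : Int) (p : Char → Bool) :
    ∀ (l : List Char) (s st kv : Int), n = s + l.length →
      (PySem.List.enumerate l s).foldl
        (fun (acc : Int × Int) x =>
          if p x.2 then (acc.1, acc.2 + (n - x.1))
          else (acc.1 + (n - x.1), acc.2))
        (st, kv)
      = (st + pvWsum (fun c => !p c) l, kv + pvWsum p l) := by
  intro l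
  induction l with
  | nil => intro s st kv h; simp [PySem.List.enumerate_nil, pvWsum]
  | cons c t ih =>
    intro s st kv h
    simp only [List.length_cons] at h
    have h' : n = (s + 1) + t.length := by push_cast at h ⊢; linarith
    simp only [PySem.List.enumerate_cons, List.foldl_cons]
    by_cases hc : p c
    · rw [if_pos hc, ih (s + 1) st (kv + (n - s)) h']
      simp only [pvWsum, hc, Bool.not_true, if_pos, Bool.false_eq_true, if_false,
        Prod.mk.injEq]
      constructor
      · ring
      · push_cast at h ⊢; linarith
    · rw [if_neg hc, ih (s + 1) (st + (n - s)) kv h']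
      simp only [pvWsum, hc, Bool.not_false, if_pos, Bool.false_eq_true, if_false,
        Prod.mk.injEq]
      constructor
      · push_cast at h ⊢; linarith
      · ring

-- B's loop: running counts, each position adding the current count, give the same suffix-weighted sums.
theorem pv_loopB (p : Char → Bool) :
    ∀ (l : List Char) (vc cc kv st : Int),
      l.foldl
        (fun (a : Int × Int × Int × Int) ch =>
          let vc' := if p ch then a.1 + 1 else a.1
          let cc' := if p ch then a.2.1 else a.2.1 + 1
          (vc', cc', a.2.2.1 + vc', a.2.2.2 + cc'))
        (vc, cc, kv, st)
      = (vc + (l.filter p).length, cc + (l.filter (fun c => !p c)).length,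
         kv + (l.length : Int) * vc + pvWsum p l,
         st + (l.length : Int) * cc + pvWsum (fun c => !p c) l) := by
  intro l
  induction l with
  | nil => intro vc cc kv st; simp [pvWsum]
  | cons c t ih =>
    intro vc cc kv st
    simp only [List.foldl_cons]
    by_cases hc : p c
    · rw [if_pos hc, if_pos hc, ih]
      simp only [pvWsum, hc, Bool.not_true, if_pos, Bool.false_eq_true, if_false,
        List.filter_cons, List.length_cons, List.length, Prod.mk.injEq]
      push_cast
      and_intros <;> first | rfl | ring | (push_cast; try ring)
    · rw [if_neg hc, if_neg hc, ih]
      simp only [pvWsum, hc, Bool.not_false, if_pos, Bool.false_eq_true, if_false,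
        List.filter_cons, List.length_cons, List.length, Prod.mk.injEq]
      push_cast
      and_intros <;> first | rfl | ring | (push_cast; try ring)

theorem pv_vowels_contains (c : Char) :
    PySem.Set.contains (PySem.Set.ofList "AEIOU".toList) c = "AEIOU".toList.contains c := by
  have h : PySem.Set.ofList "AEIOU".toList = "AEIOU".toList := by decide
  rw [h, PySem.Set.contains_eq_listContains]

-- ===== VERDICT (by name: the statement is the Claim_ definition above) =====
theorem minion_game_spec : Claim_equal_minion_game := by
  intro string _
  unfold Spec_minion_game minion_game minion_game_alt
  simp only [pv_vowels_contains]
  rw [pv_loopA (PySem.Str.len string) (fun c => "AEIOU".toList.contains c) string.toList 0 0 0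
      (by rw [PySem.Str.len_eq]; ring),
    pv_loopB (fun c => "AEIOU".toList.contains c) string.toList 0 0 0 0]
  simp
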